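-- pv_equiv track=rewrite | github.com/CryptorGit/AITuber | lip_sync/aligner.py | _levenshtein_align
-- ===== SOURCE A (Python) =====
-- from typing import Iterable, List, Optional, Protocol, Tuple
--
-- def _levenshtein_align(a: List[str], b: List[str]) -> List[Optional[int]]:
--     """Align sequence a to b. Returns mapping a_idx -> b_idx (or None).
--
--     Uses edit distance with substitution cost 1.
--     """
--     n, m = len(a), len(b)
--     if n == 0:
--         return []
--     if m == 0:
--         return [None] * n
--
--     # dp rows
--     prev = list(range(m + 1))
--     back: List[List[int]] = [[0] * (m + 1) for _ in range(n + 1)]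
--     # back codes: 0=diag,1=up(del a),2=left(ins b)
--     for j in range(1, m + 1):
--         back[0][j] = 2
--     for i in range(1, n + 1):
--         cur = [i] + [0] * m
--         back[i][0] = 1
--         for j in range(1, m + 1):
--             cost_sub = 0 if a[i - 1] == b[j - 1] else 1
--             d_diag = prev[j - 1] + cost_sub
--             d_up = prev[j] + 1
--             d_left = cur[j - 1] + 1
--             best = d_diag
--             code = 0
--             if d_up < best:
--                 best = d_up
--                 code = 1
--             if d_left < best:
--                 best = d_left
--                 code = 2
--             cur[j] = best
--             back[i][j] = code
--         prev = cur
--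
--     # Backtrace
--     mapping: List[Optional[int]] = [None] * n
--     i, j = n, m
--     while i > 0 or j > 0:
--         code = back[i][j]
--         if i > 0 and j > 0 and code == 0:
--             # match/substitute
--             mapping[i - 1] = j - 1
--             i -= 1
--             j -= 1
--         elif i > 0 and (j == 0 or code == 1):
--             # delete a
--             mapping[i - 1] = None
--             i -= 1
--         else:
--             # insert b
--             j -= 1
--     return mapping
-- ===== SOURCE B (Python) =====
-- from typing import List, Optional
--
-- def _levenshtein_align(a: List[str], b: List[str]) -> List[Optional[int]]:
--     """Single forward pass: each DP cell carries its cost and a persistent reversed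
--     alignment list (shared tails); no back-pointer table and no backtrace."""
--     n, m = len(a), len(b)
--     if n == 0:
--         return []
--     if m == 0:
--         return [None] * n
--     # alignment is a persistent singly linked list, newest a-entry first:
--     # None is the empty list, a node is (entry, tail)
--     prev_cost = list(range(m + 1))
--     prev_al: List[object] = [None] * (m + 1)
--     for i in range(1, n + 1):
--         ai = a[i - 1]
--         row_cost = [i]
--         row_al = [(None, prev_al[0])]
--         for j in range(1, m + 1):
--             d = prev_cost[j - 1] + (0 if ai == b[j - 1] else 1)
--             u = prev_cost[j] + 1
--             l = row_cost[j - 1] + 1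
--             if u < d:
--                 if l < u:
--                     best, al = l, row_al[j - 1]
--                 else:
--                     best, al = u, (None, prev_al[j])
--             else:
--                 if l < d:
--                     best, al = l, row_al[j - 1]
--                 else:
--                     best, al = d, (j - 1, prev_al[j - 1])
--             row_cost.append(best)
--             row_al.append(al)
--         prev_cost, prev_al = row_cost, row_al
--     cell = prev_al[m]
--     out: List[Optional[int]] = []
--     while cell is not None:
--         out.append(cell[0])
--         cell = cell[1]
--     return out[::-1]
-- ===== Notes on version B (the rewrite author's own statement) =====
-- stated objective: alternative
-- what changed: B removes A's back-pointer table and the whole backtrace phase: it is a single forward DP pass in which each cell carries (cost, persistent reversed alignment list built by O(1) sharing), and the result is read directly off the final cell; tie order diag>up>left is preserved by the same strict-less updates.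
import Mathlib
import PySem

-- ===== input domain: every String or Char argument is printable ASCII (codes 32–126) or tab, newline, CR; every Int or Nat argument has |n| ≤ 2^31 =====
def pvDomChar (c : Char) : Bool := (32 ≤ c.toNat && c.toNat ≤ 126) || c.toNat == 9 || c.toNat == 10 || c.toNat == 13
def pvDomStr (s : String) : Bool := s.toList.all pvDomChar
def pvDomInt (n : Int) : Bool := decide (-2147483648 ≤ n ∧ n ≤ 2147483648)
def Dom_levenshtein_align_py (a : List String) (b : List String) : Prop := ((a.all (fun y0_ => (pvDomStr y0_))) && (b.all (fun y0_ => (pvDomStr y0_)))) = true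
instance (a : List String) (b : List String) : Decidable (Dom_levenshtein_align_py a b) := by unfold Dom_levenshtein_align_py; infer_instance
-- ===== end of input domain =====

-- B removes A's back-pointer table and the backtrace phase: one forward DP pass whose
-- cells carry (cost, shared reversed alignment list); the answer is the final cell's list.

-- ===== PORT A =====
-- backtrace of A: while i > 0 or j > 0, moves decided by the back-pointer codes
-- (fuel = i + j bounds the iteration count; each step decreases i + j)
def btA (back : List (List Int)) : Nat → Nat → Nat → List (Option Int) → List (Option Int)
  | 0, _, _, mp => mp
  | fuel + 1, i, j, mp =>
    if i > 0 ∨ j > 0 then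
      let code := (back.getD i []).getD j 0
      if i > 0 ∧ j > 0 ∧ code = 0 then
        btA back fuel (i - 1) (j - 1) (mp.set (i - 1) (some ((j : Int) - 1)))
      else if i > 0 ∧ (j = 0 ∨ code = 1) then
        btA back fuel (i - 1) j (mp.set (i - 1) none)
      else
        btA back fuel i (j - 1) mp
    else mp

def levenshtein_align_py (a : List String) (b : List String) : List (Option Int) :=
  let n := a.length
  let m := b.length
  if n = 0 then []
  else if m = 0 then List.replicate n none
  else
    let prev0 : List Int := (List.range (m + 1)).map (fun j : Nat => (j : Int))
    let back0 : List Int := (List.range' 1 m).foldl (fun r j => r.set j 2) (List.replicate (m + 1) 0)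
    let st := (List.range' 1 n).foldl (fun (st : List Int × List (List Int)) i =>
        let prev := st.1
        let inner := (List.range' 1 m).foldl (fun (c : List Int × List Int) j =>
            let cur := c.1
            let brow := c.2
            let cost : Int := if a.getD (i - 1) "" = b.getD (j - 1) "" then 0 else 1
            let d_diag := prev.getD (j - 1) 0 + cost
            let d_up := prev.getD j 0 + 1
            let d_left := cur.getD (j - 1) 0 + 1
            let bc : Int × Int := if d_up < d_diag then (d_up, 1) else (d_diag, 0)
            let bc : Int × Int := if d_left < bc.1 then (d_left, 2) else bc
            (cur ++ [bc.1], brow ++ [bc.2]))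
          ([(i : Int)], [(1 : Int)])
        (inner.1, st.2 ++ [inner.2]))
      (prev0, [back0])
    btA st.2 (n + m) n m (List.replicate n none)

-- ===== PORT B =====
-- Source B's persistent linked list (nil / (entry, tail)) is List (Option Int), newest first;
-- the final collect-then-[::-1] loop is List.reverse
def levenshtein_align_py_alt (a : List String) (b : List String) : List (Option Int) :=
  let n := a.length
  let m := b.length
  if n = 0 then []
  else if m = 0 then List.replicate n none
  else
    let prev0 : List (Int × List (Option Int)) := (List.range (m + 1)).map (fun j : Nat => ((j : Int), []))
    let last := (List.range' 1 n).foldl (fun (prev : List (Int × List (Option Int))) i =>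
        let ai := a.getD (i - 1) ""
        (List.range' 1 m).foldl (fun (row : List (Int × List (Option Int))) j =>
            let pd := prev.getD (j - 1) (0, [])
            let pu := prev.getD j (0, [])
            let pl := row.getD (j - 1) (0, [])
            let d : Int := pd.1 + (if ai = b.getD (j - 1) "" then 0 else 1)
            let u : Int := pu.1 + 1
            let l : Int := pl.1 + 1
            let best : Int × List (Option Int) :=
              if u < d then (if l < u then (l, pl.2) else (u, none :: pu.2))
              else (if l < d then (l, pl.2) else (d, some ((j : Int) - 1) :: pd.2))
            row ++ [best])
          [((i : Int), none :: (prev.getD 0 (0, [])).2)])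
      prev0
    (last.getD m (0, [])).2.reverse

-- ===== PRECONDITION & SPEC =====
def Spec_levenshtein_align_py (a : List String) (b : List String) (out : List (Option Int)) : Prop := out = levenshtein_align_py_alt a b
instance (a : List String) (b : List String) (out : List (Option Int)) : Decidable (Spec_levenshtein_align_py a b out) := by unfold Spec_levenshtein_align_py; infer_instance

-- ===== CLAIM (what is proved, stated in full; the proofs are below) =====
def Claim_equal_levenshtein_align_py : Prop := ∀ (a : List String) (b : List String), Dom_levenshtein_align_py a b → Spec_levenshtein_align_py a b (levenshtein_align_py a b)

-- ===== LEMMAS AND PROOFS =====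

-- the mathematical DP value, code (A's back pointer) and reversed alignment of cell (i, j)
def dpF (a : List String) (b : List String) : Nat → Nat → Int
  | i, 0 => (i : Int)
  | 0, j + 1 => ((j : Int) + 1)
  | i + 1, j + 1 =>
    let c : Int := if a.getD i "" = b.getD j "" then 0 else 1
    min (min (dpF a b i j + c) (dpF a b i (j + 1) + 1)) (dpF a b (i + 1) j + 1)
  termination_by i j => (i, j)

def codeF (a : List String) (b : List String) : Nat → Nat → Int
  | 0, 0 => 0
  | 0, _ + 1 => 2
  | _ + 1, 0 => 1
  | i + 1, j + 1 =>
    let c : Int := if a.getD i "" = b.getD j "" then 0 else 1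
    let d := dpF a b i j + c
    let u := dpF a b i (j + 1) + 1
    let l := dpF a b (i + 1) j + 1
    if u < d then (if l < u then 2 else 1) else (if l < d then 2 else 0)

def mapF (a : List String) (b : List String) : Nat → Nat → List (Option Int)
  | i, 0 => List.replicate i none
  | 0, _ + 1 => []
  | i + 1, j + 1 =>
    let c : Int := if a.getD i "" = b.getD j "" then 0 else 1
    let d := dpF a b i j + c
    let u := dpF a b i (j + 1) + 1
    let l := dpF a b (i + 1) j + 1
    if u < d then (if l < u then mapF a b (i + 1) j else none :: mapF a b i (j + 1))
    else (if l < d then mapF a b (i + 1) j else some (j : Int) :: mapF a b i j)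
  termination_by i j => (i, j)

lemma dpF_succ (a b : List String) (i j : Nat) :
    dpF a b (i + 1) (j + 1) = min (min (dpF a b i j + (if a.getD i "" = b.getD j "" then (0:Int) else 1)) (dpF a b i (j + 1) + 1)) (dpF a b (i + 1) j + 1) := by
  rw [dpF]

lemma codeF_succ (a b : List String) (i j : Nat) :
    codeF a b (i + 1) (j + 1) =
      (if (dpF a b i (j + 1) + 1) < (dpF a b i j + (if a.getD i "" = b.getD j "" then (0:Int) else 1)) then
        (if (dpF a b (i + 1) j + 1) < (dpF a b i (j + 1) + 1) then 2 else 1)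
      else (if (dpF a b (i + 1) j + 1) < (dpF a b i j + (if a.getD i "" = b.getD j "" then (0:Int) else 1)) then 2 else 0)) := by
  rw [codeF]

lemma mapF_succ (a b : List String) (i j : Nat) :
    mapF a b (i + 1) (j + 1) =
      (if (dpF a b i (j + 1) + 1) < (dpF a b i j + (if a.getD i "" = b.getD j "" then (0:Int) else 1)) then
        (if (dpF a b (i + 1) j + 1) < (dpF a b i (j + 1) + 1) then mapF a b (i + 1) j else none :: mapF a b i (j + 1))
      else (if (dpF a b (i + 1) j + 1) < (dpF a b i j + (if a.getD i "" = b.getD j "" then (0:Int) else 1)) then mapF a b (i + 1) j else some (j : Int) :: mapF a b i j)) := by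
  rw [mapF]

lemma mapF_of_code0 (a b : List String) (i j : Nat) (h : codeF a b (i + 1) (j + 1) = 0) :
    mapF a b (i + 1) (j + 1) = some (j : Int) :: mapF a b i j := by
  rw [codeF_succ] at h; rw [mapF_succ]; split_ifs at h ⊢ <;> simp_all
lemma mapF_of_code1 (a b : List String) (i j : Nat) (h : codeF a b (i + 1) (j + 1) = 1) :
    mapF a b (i + 1) (j + 1) = none :: mapF a b i (j + 1) := by
  rw [codeF_succ] at h; rw [mapF_succ]; split_ifs at h ⊢ <;> simp_all
lemma mapF_of_code2 (a b : List String) (i j : Nat)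
    (h0 : codeF a b (i + 1) (j + 1) ≠ 0) (h1 : codeF a b (i + 1) (j + 1) ≠ 1) :
    mapF a b (i + 1) (j + 1) = mapF a b (i + 1) j := by
  rw [codeF_succ] at h0 h1; rw [mapF_succ]; split_ifs at h0 h1 ⊢ <;> simp_all

lemma foldSet_get (t : Nat) (l : List Int) (k : Nat) :
    ((List.range' 1 t).foldl (fun r j => r.set j 2) l)[k]? =
      if 1 ≤ k ∧ k ≤ t ∧ k < l.length then some 2 else l[k]? := by
  induction t generalizing l with
  | zero => simp; omega
  | succ t ih =>
    rw [List.range'_1_concat, List.foldl_append]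
    simp only [List.foldl_cons, List.foldl_nil]
    by_cases hk : k = 1 + t
    · subst hk
      rw [List.getElem?_set_self', ih]
      have h2 : ¬(1 + t ≤ t) := by omega
      simp only [h2, and_false, false_and, if_false]
      by_cases hb : 1 + t < l.length
      · rw [List.getElem?_eq_getElem hb]; simp; omega
      · rw [List.getElem?_eq_none (by omega)]; simp; omega
    · rw [List.getElem?_set_ne (by omega), ih]
      by_cases h1 : 1 ≤ k ∧ k ≤ t ∧ k < l.length
      · simp only [h1]; have : 1 ≤ k ∧ k ≤ t + 1 ∧ k < l.length := by omega
        simp [this]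
      · have h3 : ¬(1 ≤ k ∧ k ≤ t + 1 ∧ k < l.length) := by omega
        simp [h1, h3]

lemma back0_eq (a b : List String) (m : Nat) :
    (List.range' 1 m).foldl (fun r j => r.set j 2) (List.replicate (m + 1) (0 : Int)) =
      (List.range (m + 1)).map (fun j => codeF a b 0 j) := by
  apply List.ext_getElem?
  intro k
  rw [foldSet_get]
  by_cases hk : k < m + 1
  · rw [List.getElem?_map, List.getElem?_range hk]
    rcases k with _ | k
    · simp [codeF]
    · have : 1 ≤ k + 1 ∧ k + 1 ≤ m ∧ k + 1 < (List.replicate (m + 1) (0 : Int)).length := by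
        simp; omega
      simp [this, codeF]
  · have h3 : ¬(1 ≤ k ∧ k ≤ m ∧ k < (List.replicate (m + 1) (0 : Int)).length) := by simp; omega
    rw [if_neg h3, List.getElem?_eq_none (by simpa using hk), List.getElem?_eq_none (by simpa using hk)]

lemma innerA (a b : List String) (m i : Nat) (prev : List Int)
    (hprev : ∀ j ≤ m, prev.getD j 0 = dpF a b i j) :
    ∀ t ≤ m,
      (List.range' 1 t).foldl (fun (c : List Int × List Int) j =>
          let cur := c.1
          let brow := c.2
          let cost : Int := if a.getD (i + 1 - 1) "" = b.getD (j - 1) "" then 0 else 1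
          let d_diag := prev.getD (j - 1) 0 + cost
          let d_up := prev.getD j 0 + 1
          let d_left := cur.getD (j - 1) 0 + 1
          let bc : Int × Int := if d_up < d_diag then (d_up, 1) else (d_diag, 0)
          let bc : Int × Int := if d_left < bc.1 then (d_left, 2) else bc
          (cur ++ [bc.1], brow ++ [bc.2]))
        ([((i : Int) + 1)], [(1 : Int)]) =
      ((List.range (t + 1)).map (fun j => dpF a b (i + 1) j),
       (List.range (t + 1)).map (fun j => codeF a b (i + 1) j)) := by
  intro t
  induction t with
  | zero => intro _; simp [dpF, codeF, List.range_succ]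
  | succ t ih =>
    intro ht
    rw [List.range'_1_concat, List.foldl_append]
    rw [ih (by omega)]
    simp only [List.foldl_cons, List.foldl_nil]
    have e1 : 1 + t - 1 = t := by omega
    have e2 : i + 1 - 1 = i := by omega
    rw [e1, e2]
    have hd : prev.getD t 0 = dpF a b i t := hprev t (by omega)
    have hu : prev.getD (1 + t) 0 = dpF a b i (t + 1) := by
      rw [Nat.add_comm 1 t]; exact hprev (t + 1) (by omega)
    have hl : ((List.range (t + 1)).map (fun j => dpF a b (i + 1) j)).getD t 0 = dpF a b (i + 1) t :=
      PySem.List.getD_map_range _ _ _ _ (by omega)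
    rw [hd, hu, hl]
    conv_rhs => rw [List.range_succ]
    simp only [List.map_append, List.map_cons, List.map_nil, Prod.mk.injEq]
    constructor
    · rw [dpF_succ]
      generalize (if a.getD i "" = b.getD t "" then (0:Int) else 1) = C
      generalize dpF a b i t = D
      generalize dpF a b i (t + 1) = U
      generalize dpF a b (i + 1) t = L
      simp only [min_def]
      split_ifs <;> first | rfl | omega
    · rw [codeF_succ]
      generalize (if a.getD i "" = b.getD t "" then (0:Int) else 1) = C
      generalize dpF a b i t = D
      generalize dpF a b i (t + 1) = U
      generalize dpF a b (i + 1) t = L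
      split_ifs <;> rfl

lemma outerA (a b : List String) (m : Nat) :
    ∀ t,
      (List.range' 1 t).foldl (fun (st : List Int × List (List Int)) i =>
          let prev := st.1
          let inner := (List.range' 1 m).foldl (fun (c : List Int × List Int) j =>
              let cur := c.1
              let brow := c.2
              let cost : Int := if a.getD (i - 1) "" = b.getD (j - 1) "" then 0 else 1
              let d_diag := prev.getD (j - 1) 0 + cost
              let d_up := prev.getD j 0 + 1
              let d_left := cur.getD (j - 1) 0 + 1
              let bc : Int × Int := if d_up < d_diag then (d_up, 1) else (d_diag, 0)
              let bc : Int × Int := if d_left < bc.1 then (d_left, 2) else bc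
              (cur ++ [bc.1], brow ++ [bc.2]))
            ([(i : Int)], [(1 : Int)])
          (inner.1, st.2 ++ [inner.2]))
        ((List.range (m + 1)).map (fun j : Nat => (j : Int)),
         [(List.range' 1 m).foldl (fun r j => r.set j 2) (List.replicate (m + 1) (0 : Int))]) =
      ((List.range (m + 1)).map (fun j => dpF a b t j),
       (List.range (t + 1)).map (fun i => (List.range (m + 1)).map (fun j => codeF a b i j))) := by
  rw [back0_eq a b m]
  intro t
  induction t with
  | zero =>
    have : (List.range (m + 1)).map (fun j : Nat => (j : Int)) = (List.range (m + 1)).map (fun j => dpF a b 0 j) := by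
      refine List.map_congr_left (fun j _ => ?_)
      cases j <;> simp [dpF]
    simp only [List.range'_zero, List.foldl_nil, this, Prod.mk.injEq]
    constructor <;> simp [List.range_one]
  | succ t ih =>
    rw [List.range'_1_concat, List.foldl_append, ih]
    simp only [List.foldl_cons, List.foldl_nil]
    rw [show (1 + t) = t + 1 from by omega]
    have hin := innerA a b m t ((List.range (m + 1)).map (fun j => dpF a b t j))
      (fun j hj => PySem.List.getD_map_range _ _ _ _ (by omega)) m (le_refl m)
    rw [show ((t : Int) + 1) = ((t + 1 : Nat) : Int) from by push_cast; ring] at hin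
    conv_rhs => rw [List.range_succ (n := t + 1)]
    rw [List.map_append]
    simp only [List.map_cons, List.map_nil, Prod.mk.injEq]
    constructor
    · exact congrArg Prod.fst hin
    · exact congrArg (fun z => (List.range (t + 1)).map
        (fun i => (List.range (m + 1)).map (fun j => codeF a b i j)) ++ [z]) (congrArg Prod.snd hin)

lemma innerB (a b : List String) (m i : Nat) (prev : List (Int × List (Option Int)))
    (hprev : ∀ j ≤ m, prev.getD j (0, []) = (dpF a b i j, mapF a b i j)) :
    ∀ t ≤ m,
      (List.range' 1 t).foldl (fun (row : List (Int × List (Option Int))) j =>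
          let pd := prev.getD (j - 1) (0, [])
          let pu := prev.getD j (0, [])
          let pl := row.getD (j - 1) (0, [])
          let d : Int := pd.1 + (if a.getD (i + 1 - 1) "" = b.getD (j - 1) "" then 0 else 1)
          let u : Int := pu.1 + 1
          let l : Int := pl.1 + 1
          let best : Int × List (Option Int) :=
            if u < d then (if l < u then (l, pl.2) else (u, none :: pu.2))
            else (if l < d then (l, pl.2) else (d, some ((j : Int) - 1) :: pd.2))
          row ++ [best])
        [((i : Int) + 1, none :: (prev.getD 0 (0, [])).2)] =
      (List.range (t + 1)).map (fun j => (dpF a b (i + 1) j, mapF a b (i + 1) j)) := by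
  intro t
  induction t with
  | zero =>
    intro _
    rw [hprev 0 (by omega)]
    have h1 : dpF a b (i + 1) 0 = (i : Int) + 1 := by simp [dpF]
    have h2 : mapF a b (i + 1) 0 = none :: mapF a b i 0 := by simp [mapF, List.replicate_succ]
    simp [h1, h2, List.range_one]
  | succ t ih =>
    intro ht
    rw [List.range'_1_concat, List.foldl_append]
    rw [ih (by omega)]
    simp only [List.foldl_cons, List.foldl_nil]
    have e1 : 1 + t - 1 = t := by omega
    have e2 : i + 1 - 1 = i := by omega
    rw [e1, e2]
    rw [hprev t (by omega)]
    rw [show (1 + t) = t + 1 from by omega, hprev (t + 1) (by omega)]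
    rw [PySem.List.getD_map_range (fun j => (dpF a b (i + 1) j, mapF a b (i + 1) j)) (t + 1) t (0, []) (by omega)]
    conv_rhs => rw [List.range_succ]
    simp only [List.map_append, List.map_cons, List.map_nil]
    congr 1
    rw [show ((t + 1 : Nat) : Int) - 1 = (t : Int) from by push_cast; ring]
    rw [dpF_succ, mapF_succ]
    generalize (if a.getD i "" = b.getD t "" then (0:Int) else 1) = C
    generalize dpF a b i t = D
    generalize dpF a b i (t + 1) = U
    generalize dpF a b (i + 1) t = L
    simp only [min_def]
    split_ifs <;> first | rfl | omega

lemma outerB (a b : List String) (m : Nat) :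
    ∀ t,
      (List.range' 1 t).foldl (fun (prev : List (Int × List (Option Int))) i =>
          let ai := a.getD (i - 1) ""
          (List.range' 1 m).foldl (fun (row : List (Int × List (Option Int))) j =>
              let pd := prev.getD (j - 1) (0, [])
              let pu := prev.getD j (0, [])
              let pl := row.getD (j - 1) (0, [])
              let d : Int := pd.1 + (if ai = b.getD (j - 1) "" then 0 else 1)
              let u : Int := pu.1 + 1
              let l : Int := pl.1 + 1
              let best : Int × List (Option Int) :=
                if u < d then (if l < u then (l, pl.2) else (u, none :: pu.2))
                else (if l < d then (l, pl.2) else (d, some ((j : Int) - 1) :: pd.2))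
              row ++ [best])
            [((i : Int), none :: (prev.getD 0 (0, [])).2)])
        ((List.range (m + 1)).map (fun j : Nat => ((j : Int), ([] : List (Option Int))))) =
      (List.range (m + 1)).map (fun j => (dpF a b t j, mapF a b t j)) := by
  intro t
  induction t with
  | zero =>
    simp only [List.range'_zero, List.foldl_nil]
    refine List.map_congr_left (fun j _ => ?_)
    cases j <;> simp [dpF, mapF]
  | succ t ih =>
    rw [List.range'_1_concat, List.foldl_append, ih]
    simp only [List.foldl_cons, List.foldl_nil]
    rw [show (1 + t) = t + 1 from by omega]
    have hprev : ∀ j ≤ m, ((List.range (m + 1)).map (fun j => (dpF a b t j, mapF a b t j))).getD j (0, []) = (dpF a b t j, mapF a b t j) :=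
      fun j hj => PySem.List.getD_map_range _ _ _ _ (by omega)
    have hin := innerB a b m t ((List.range (m + 1)).map (fun j => (dpF a b t j, mapF a b t j))) hprev m (le_refl m)
    rw [show ((t : Int) + 1) = ((t + 1 : Nat) : Int) from by push_cast; ring] at hin
    exact hin

lemma set_drop (mp : List (Option Int)) (i : Nat) (x : Option Int) (h : i < mp.length) :
    (mp.set i x).drop i = x :: mp.drop (i + 1) := by
  induction mp generalizing i with
  | nil => simp at h
  | cons y ys ih =>
    cases i with
    | zero => simp
    | succ i => simpa using ih i (by simpa using h)

-- A's backtrace from (i, j) produces the reversed alignment of cell (i, j)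
lemma btA_eq_mapF (a b : List String) (n m : Nat) (back : List (List Int))
    (hback : ∀ i ≤ n, ∀ j ≤ m, (back.getD i []).getD j 0 = codeF a b i j) :
    ∀ (fuel i j : Nat) (mp : List (Option Int)), i ≤ n → j ≤ m → i + j ≤ fuel → i ≤ mp.length →
      btA back fuel i j mp = (mapF a b i j).reverse ++ mp.drop i := by
  intro fuel
  induction fuel with
  | zero =>
    intro i j mp hi hj hf _
    have : i = 0 ∧ j = 0 := by omega
    rcases this with ⟨rfl, rfl⟩
    simp [btA, mapF]
  | succ fuel ih =>
    intro i j mp hi hj hf hlen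
    rcases i with _ | i
    · rcases j with _ | j
      · simp [btA, mapF]
      · simp only [btA]
        simp only [gt_iff_lt, lt_self_iff_false, false_and, if_false, Nat.zero_lt_succ,
          or_true, if_true]
        rw [ih 0 (j + 1 - 1) mp (by omega) (by omega) (by omega) (by omega)]
        have hz : ∀ k, mapF a b 0 k = [] := by intro k; cases k <;> simp [mapF]
        simp [hz]
    · rcases j with _ | j
      · simp only [btA]
        simp only [gt_iff_lt, lt_self_iff_false, false_and, and_false, if_false,
          Nat.zero_lt_succ, true_or, if_true, true_and, or_false]
        rw [show (i + 1 - 1) = i from by omega]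
        rw [ih i 0 (mp.set i none) (by omega) (by omega) (by omega) (by simp; omega)]
        rw [show mapF a b (i + 1) 0 = none :: mapF a b i 0 from by simp [mapF, List.replicate_succ]]
        rw [List.reverse_cons, List.append_assoc]
        congr 1
        simp only [List.singleton_append]
        exact set_drop mp i none (by omega)
      · have hcode := hback (i + 1) hi (j + 1) hj
        simp only [btA]
        simp only [gt_iff_lt, Nat.zero_lt_succ, true_or, if_true, true_and,
          Nat.succ_ne_zero, false_or, Nat.add_sub_cancel]
        rw [hcode]
        by_cases hc0 : codeF a b (i + 1) (j + 1) = 0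
        · rw [if_pos hc0]
          rw [show ((j + 1 : Nat) : Int) - 1 = (j : Int) from by push_cast; ring]
          rw [ih i j (mp.set i (some (j : Int))) (by omega) (by omega) (by omega) (by simp; omega)]
          rw [mapF_of_code0 a b i j hc0, List.reverse_cons, List.append_assoc]
          congr 1
          simp only [List.singleton_append]
          exact set_drop mp i _ (by omega)
        · rw [if_neg hc0]
          by_cases hc1 : codeF a b (i + 1) (j + 1) = 1
          · rw [if_pos hc1]
            rw [ih i (j + 1) (mp.set i none) (by omega) (by omega) (by omega) (by simp; omega)]
            rw [mapF_of_code1 a b i j hc1, List.reverse_cons, List.append_assoc]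
            congr 1
            simp only [List.singleton_append]
            exact set_drop mp i none (by omega)
          · rw [if_neg hc1]
            rw [ih (i + 1) j mp (by omega) (by omega) (by omega) hlen]
            rw [mapF_of_code2 a b i j hc0 hc1]

theorem levenshtein_align_py_eq (a b : List String) :
    levenshtein_align_py a b = levenshtein_align_py_alt a b := by
  unfold levenshtein_align_py levenshtein_align_py_alt
  by_cases hn : a.length = 0
  · simp [hn]
  · by_cases hm : b.length = 0
    · simp [hn, hm]
    · rw [if_neg hn, if_neg hn, if_neg hm, if_neg hm]
      have hback : ∀ i ≤ a.length, ∀ j ≤ b.length,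
          (((List.range (a.length + 1)).map (fun i => (List.range (b.length + 1)).map
            (fun j => codeF a b i j))).getD i []).getD j 0 = codeF a b i j := by
        intro i hi j hj
        rw [PySem.List.getD_map_range (fun i => (List.range (b.length + 1)).map
          (fun j => codeF a b i j)) (a.length + 1) i [] (by omega)]
        exact PySem.List.getD_map_range _ _ _ _ (by omega)
      have hA := congrArg (fun z : List Int × List (List Int) =>
          btA z.2 (a.length + b.length) a.length b.length (List.replicate a.length none))
        (outerA a b b.length a.length)
      have hB := congrArg (fun z : List (Int × List (Option Int)) =>
          (z.getD b.length (0, [])).2.reverse)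
        (outerB a b b.length a.length)
      have h_mid : btA ((List.range (a.length + 1)).map (fun i => (List.range (b.length + 1)).map
            (fun j => codeF a b i j))) (a.length + b.length) a.length b.length
            (List.replicate a.length none)
          = ((((List.range (b.length + 1)).map (fun j => (dpF a b a.length j, mapF a b a.length j))).getD
              b.length (0, [])).2).reverse := by
        rw [btA_eq_mapF a b a.length b.length _ hback (a.length + b.length) a.length b.length
          (List.replicate a.length none) (le_refl _) (le_refl _) (le_refl _) (by simp)]
        rw [PySem.List.getD_map_range (fun j => (dpF a b a.length j, mapF a b a.length j))
          (b.length + 1) b.length (0, []) (by omega)]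
        simp
      exact hA.trans (h_mid.trans hB.symm)

-- ===== VERDICT (by name: the statement is the Claim_ definition above) =====
theorem levenshtein_align_py_spec : Claim_equal_levenshtein_align_py := by
  intro a b _
  exact levenshtein_align_py_eq a b
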